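-- pv_equiv track=rewrite | github.com/eric-d-knowles/ngram-kit | src/davieskit/davies_acquire/tokenizer.py | combine_bigrams_in_tokens
-- ===== SOURCE A (Python) =====
-- from typing import Iterator, List, Optional, Set
--
-- def combine_bigrams_in_tokens(tokens: List[str], combined_bigrams: Set[str]) -> List[str]:
--     """
--     Replace consecutive token pairs matching combined_bigrams with hyphenated versions.
--
--     Scans the token list from left to right, looking for consecutive pairs
--     that match entries in combined_bigrams (case-insensitive). When found,
--     replaces the pair with a hyphenated version.
--
--     Args:
--         tokens: List of tokens (e.g., ["the", "working", "class", "family"])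
--         combined_bigrams: Set of bigrams to combine (e.g., {"working class", "middle class"})
--                          Note: Bigrams in the set should be lowercase with spaces
--
--     Returns:
--         Modified token list with bigrams hyphenated (e.g., ["the", "working-class", "family"])
--
--     Examples:
--         >>> combine_bigrams_in_tokens(["the", "working", "class"], {"working class"})
--         ['the', 'working-class']
--         >>> combine_bigrams_in_tokens(["lower", "class", "working", "class"], {"lower class", "working class"})
--         ['lower-class', 'working-class']
--     """
--     if not combined_bigrams or len(tokens) < 2:
--         return tokens
--
--     result = []
--     i = 0
--
--     while i < len(tokens):
--         # Check if we have at least 2 tokens remaining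
--         if i + 1 < len(tokens):
--             # Form potential bigram (lowercase for matching)
--             bigram = f"{tokens[i].lower()} {tokens[i+1].lower()}"
--
--             # If bigram matches, combine with hyphen
--             if bigram in combined_bigrams:
--                 # Preserve original casing in first token
--                 result.append(f"{tokens[i]}-{tokens[i+1]}")
--                 i += 2  # Skip both tokens
--                 continue
--
--         # No match, keep token as-is
--         result.append(tokens[i])
--         i += 1
--
--     return result
-- ===== SOURCE B (Python) =====
-- def combine_bigrams_in_tokens(tokens, combined_bigrams):
--     if not combined_bigrams or len(tokens) < 2:
--         return tokens
--     result = []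
--     pending = None
--     for t in tokens:
--         if pending is None:
--             pending = t
--         elif f"{pending.lower()} {t.lower()}" in combined_bigrams:
--             result.append(f"{pending}-{t}")
--             pending = None
--         else:
--             result.append(pending)
--             pending = t
--     if pending is not None:
--         result.append(pending)
--     return result
-- ===== Notes on version B (the rewrite author's own statement) =====
-- stated objective: faster
-- what changed: Replaced A's index-based while loop with lookahead indexing and i+=2/i+=1 skips by a single streaming for-loop carrying a one-token 'pending' buffer (emit hyphenated pair or flush the buffer), with a final flush after the loop.
import Mathlib
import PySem

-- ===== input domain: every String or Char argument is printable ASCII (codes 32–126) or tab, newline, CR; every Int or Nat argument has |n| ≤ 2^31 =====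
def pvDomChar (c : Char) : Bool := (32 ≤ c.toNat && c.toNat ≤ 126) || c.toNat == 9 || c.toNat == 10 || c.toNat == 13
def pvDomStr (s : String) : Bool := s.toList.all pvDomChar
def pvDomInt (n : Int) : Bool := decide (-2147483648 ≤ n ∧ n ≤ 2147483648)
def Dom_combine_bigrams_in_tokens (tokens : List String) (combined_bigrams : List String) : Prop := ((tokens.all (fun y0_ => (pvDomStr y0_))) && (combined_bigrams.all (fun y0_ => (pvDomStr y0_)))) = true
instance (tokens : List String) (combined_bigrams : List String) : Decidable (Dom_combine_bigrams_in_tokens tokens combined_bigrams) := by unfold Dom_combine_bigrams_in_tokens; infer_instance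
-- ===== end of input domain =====

-- B replaces A's index-based lookahead loop (skip 2 on a match) by a streaming pass
-- carrying a one-token 'pending' buffer; same values on every input (alternative decomposition).

-- ===== PORT A =====
-- A's while loop over index i: looks at tokens[i], tokens[i+1]; on a match emits the
-- hyphenated pair and jumps i += 2, else emits tokens[i] and i += 1.  Ported as
-- recursion on the suffix starting at i (the loop touches only that suffix).
def pvLoopA (bigrams : PySem.Set String) : List String → List String
  | t1 :: t2 :: rest =>
      if PySem.Set.contains bigrams (PySem.Str.lower t1 ++ " " ++ PySem.Str.lower t2) then
        (t1 ++ "-" ++ t2) :: pvLoopA bigrams rest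
      else
        t1 :: pvLoopA bigrams (t2 :: rest)
  | l => l

def combine_bigrams_in_tokens (tokens : List String) (combined_bigrams : List String) : List String :=
  if combined_bigrams.isEmpty || decide (tokens.length < 2) then tokens
  else pvLoopA combined_bigrams tokens

-- ===== PORT B =====
-- B's loop body: the state is (result, pending).
def pvStepB (bigrams : PySem.Set String) (st : List String × Option String) (t : String) :
    List String × Option String :=
  match st.2 with
  | none => (st.1, some t)
  | some p =>
      if PySem.Set.contains bigrams (PySem.Str.lower p ++ " " ++ PySem.Str.lower t) then
        (st.1 ++ [p ++ "-" ++ t], none)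
      else
        (st.1 ++ [p], some t)

-- the trailing 'if pending is not None: result.append(pending)'
def pvFlushB (st : List String × Option String) : List String :=
  match st.2 with
  | none => st.1
  | some p => st.1 ++ [p]

def combine_bigrams_in_tokens_alt (tokens : List String) (combined_bigrams : List String) : List String :=
  if combined_bigrams.isEmpty || decide (tokens.length < 2) then tokens
  else pvFlushB (tokens.foldl (pvStepB combined_bigrams) ([], none))

-- ===== PRECONDITION & SPEC =====
def Spec_combine_bigrams_in_tokens (tokens : List String) (combined_bigrams : List String) (out : List String) : Prop := out = combine_bigrams_in_tokens_alt tokens combined_bigrams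
instance (tokens : List String) (combined_bigrams : List String) (out : List String) : Decidable (Spec_combine_bigrams_in_tokens tokens combined_bigrams out) := by unfold Spec_combine_bigrams_in_tokens; infer_instance

-- ===== CLAIM (what is proved, stated in full; the proofs are below) =====
def Claim_equal_combine_bigrams_in_tokens : Prop := ∀ (tokens : List String) (combined_bigrams : List String), Dom_combine_bigrams_in_tokens tokens combined_bigrams → Spec_combine_bigrams_in_tokens tokens combined_bigrams (combine_bigrams_in_tokens tokens combined_bigrams)

-- ===== LEMMAS AND PROOFS =====
-- unfolding equation for A's loop on a two-token front
theorem pvLoopA_two (bigrams : PySem.Set String) (t1 t2 : String) (rest : List String) :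
    pvLoopA bigrams (t1 :: t2 :: rest) =
      if PySem.Set.contains bigrams (PySem.Str.lower t1 ++ " " ++ PySem.Str.lower t2) then
        (t1 ++ "-" ++ t2) :: pvLoopA bigrams rest
      else
        t1 :: pvLoopA bigrams (t2 :: rest) := rfl

-- Invariant of B's streaming pass: flushing the fold from state (acc, o) yields acc
-- followed by A's loop run on the pending token (if any) prepended to the remaining input.
theorem pvFold_eq (bigrams : PySem.Set String) (l : List String) :
    ∀ (acc : List String) (o : Option String),
      pvFlushB (l.foldl (pvStepB bigrams) (acc, o)) =
        acc ++ (match o with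
                | none => pvLoopA bigrams l
                | some p => pvLoopA bigrams (p :: l)) := by
  induction l with
  | nil =>
      intro acc o
      cases o <;> simp [pvFlushB, pvLoopA]
  | cons t rest ih =>
      intro acc o
      cases o with
      | none =>
          simpa [pvStepB] using ih acc (some t)
      | some p =>
          by_cases h : PySem.Set.contains bigrams
              (PySem.Str.lower p ++ " " ++ PySem.Str.lower t) = true
          · rw [List.foldl_cons,
                show pvStepB bigrams (acc, some p) t = (acc ++ [p ++ "-" ++ t], none) from by
                  simp only [pvStepB]; rw [if_pos h],
                ih]
            simp [pvLoopA_two]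
            exact fun hmem => absurd (by simpa using h) hmem
          · rw [List.foldl_cons,
                show pvStepB bigrams (acc, some p) t = (acc ++ [p], some t) from by
                  simp only [pvStepB]; rw [if_neg h],
                ih]
            simp [pvLoopA_two]
            exact fun hmem => absurd (by simpa using hmem) h

-- ===== VERDICT (by name: the statement is the Claim_ definition above) =====
theorem combine_bigrams_in_tokens_spec : Claim_equal_combine_bigrams_in_tokens := by
  intro tokens combined_bigrams _
  unfold Spec_combine_bigrams_in_tokens combine_bigrams_in_tokens combine_bigrams_in_tokens_alt
  split
  · rfl
  · simpa using (pvFold_eq combined_bigrams tokens [] none).symm
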